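-- pv_equiv track=rewrite | github.com/goldsergeant/Algorithm-problem-solving | 백준/Gold/12919. A와 B 2/A와 B 2.py | bfs
-- ===== SOURCE A (Python) =====
-- import collections
--
-- def bfs(s,t):
--     q=collections.deque([t])
--     visited = set()
--
--     while q:
--         word=q.popleft()
--         if word==s:
--             return 1
--         if len(word)>=2:
--             if word[-1]=='A':
--                 tmp = word[:-1]
--                 if tmp not in visited:
--                     q.append(tmp)
--                     visited.add(tmp)
--             if word[0]=='B':
--                 tmp=word[::-1][:-1]
--                 if tmp not in visited:
--                     q.append(tmp)
--                     visited.add(tmp)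
--
--     return 0
-- ===== SOURCE B (Python) =====
-- def bfs(s, t):
--     # Recursive DFS that undoes the two rules, working backwards from t toward s.
--     def dfs(word):
--         if word == s:
--             return 1
--         if len(word) < 2 or len(word) < len(s):
--             return 0
--         r1 = dfs(word[:-1]) if word[-1] == 'A' else 0
--         if r1 == 1:
--             return 1
--         r2 = dfs(word[::-1][:-1]) if word[0] == 'B' else 0
--         if r2 == 1:
--             return 1
--         return 0
--     return dfs(t)
-- ===== Notes on version B (the rewrite author's own statement) =====
-- stated objective: simpler
-- what changed: Replaced the deque+visited-set breadth-first search by a short recursive DFS that undoes the two rules directly (drop a trailing 'A'; reverse-and-drop when the word starts with 'B'), pruning words shorter than s; no queue and no visited set are maintained.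
import Mathlib
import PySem

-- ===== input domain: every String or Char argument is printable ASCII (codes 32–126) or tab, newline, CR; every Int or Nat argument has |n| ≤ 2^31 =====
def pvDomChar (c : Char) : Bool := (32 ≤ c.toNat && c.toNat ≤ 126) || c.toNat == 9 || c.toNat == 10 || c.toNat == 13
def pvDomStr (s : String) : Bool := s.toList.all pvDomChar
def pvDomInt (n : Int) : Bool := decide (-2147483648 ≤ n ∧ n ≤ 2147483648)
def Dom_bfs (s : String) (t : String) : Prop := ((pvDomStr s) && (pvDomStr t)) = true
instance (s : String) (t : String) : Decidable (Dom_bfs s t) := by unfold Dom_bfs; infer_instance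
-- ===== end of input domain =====

-- B replaces A's queue/visited BFS by a short recursive DFS that undoes the two rules
-- (drop a trailing 'A'; reverse and drop when the word starts with 'B'), pruning words
-- shorter than s; objective: simpler (no queue, no visited set).

-- ===== PORT A =====
-- word[:-1]
def pyDropLast (w : String) : String := PySem.Str.slice w none (some (-1))

-- word[::-1][:-1]  (slice? with step -1 never raises; the none branch is unreachable)
def pyRevDropLast (w : String) : String :=
  match PySem.Str.slice? w none none (-1) with
  | some r => PySem.Str.slice r none (some (-1))
  | none => w

theorem toList_pyDropLast (w : String) : (pyDropLast w).toList = w.toList.dropLast := by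
  simp only [pyDropLast, PySem.Str.slice_to_neg_one]

theorem toList_pyRevDropLast (w : String) :
    (pyRevDropLast w).toList = w.toList.reverse.dropLast := by
  unfold pyRevDropLast
  rw [PySem.Str.slice?_none_none_neg_one]
  simp only [PySem.Str.slice_to_neg_one, String.toList_ofList]

-- expansion of one dequeued word: the words newly appended to the queue, and the new visited set
def bfsStep (word : String) (visited : PySem.Set String) :
    List String × PySem.Set String :=
  let p1 : List String × PySem.Set String :=
    if PySem.Str.pyGet? word (-1) = some 'A' then
      let tmp := pyDropLast word
      if visited.contains tmp then ([], visited) else ([tmp], visited.add tmp)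
    else ([], visited)
  if PySem.Str.pyGet? word 0 = some 'B' then
    let tmp := pyRevDropLast word
    if p1.2.contains tmp then p1 else (p1.1 ++ [tmp], p1.2.add tmp)
  else p1

-- termination helper for the queue loop (cited in decreasing_by)
theorem bfsStep_measure (word : String) (v : PySem.Set String) :
    (((bfsStep word v).1).map (fun w => 3 ^ w.toList.length)).sum ≤
      2 * 3 ^ (word.toList.length - 1) := by
  have hA : (pyDropLast word).length = word.length - 1 := by
    have h := congrArg List.length (toList_pyDropLast word)
    simpa using h
  have hB : (pyRevDropLast word).length = word.length - 1 := by
    have h := congrArg List.length (toList_pyRevDropLast word)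
    simpa using h
  simp only [bfsStep]
  split_ifs <;> simp [hA, hB] <;> omega

def bfsLoop (s : String) (q : List String) (visited : PySem.Set String) : Int :=
  match q with
  | [] => 0
  | word :: rest =>
    if word = s then 1
    else if h2 : 2 ≤ PySem.Str.len word then
      let p := bfsStep word visited
      bfsLoop s (rest ++ p.1) p.2
    else bfsLoop s rest visited
termination_by (q.map (fun w => 3 ^ w.toList.length)).sum
decreasing_by
  · have hm := bfsStep_measure word visited
    have hl : 1 ≤ word.toList.length := by
      have := PySem.Str.len_eq word; omega
    have hp : 3 ^ word.toList.length = 3 ^ (word.toList.length - 1) * 3 := by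
      rw [← pow_succ]; congr 1; omega
    have hpos : 1 ≤ 3 ^ (word.toList.length - 1) := Nat.one_le_pow _ _ (by omega)
    simp only [List.map_cons, List.sum_cons, List.map_append, List.sum_append]
    omega
  · simp only [List.map_cons, List.sum_cons]
    have : 0 < 3 ^ word.toList.length := pow_pos (by omega) _
    omega

def bfs (s : String) (t : String) : Int := bfsLoop s [t] PySem.Set.empty

-- ===== PORT B =====
def dfsAlt (s : String) (word : String) : Int :=
  if word = s then 1
  else if h2 : PySem.Str.len word < 2 ∨ PySem.Str.len word < PySem.Str.len s then 0
  else
    let r1 : Int :=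
      if PySem.Str.pyGet? word (-1) = some 'A' then dfsAlt s (pyDropLast word) else 0
    if r1 = 1 then 1
    else
      let r2 : Int :=
        if PySem.Str.pyGet? word 0 = some 'B' then dfsAlt s (pyRevDropLast word) else 0
      if r2 = 1 then 1 else 0
termination_by word.toList.length
decreasing_by
  · rw [toList_pyDropLast, List.length_dropLast]
    have h := PySem.Str.len_eq word
    omega
  · rw [toList_pyRevDropLast, List.length_dropLast, List.length_reverse]
    have h := PySem.Str.len_eq word
    omega

def bfs_alt (s : String) (t : String) : Int := dfsAlt s t

-- ===== PRECONDITION & SPEC =====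
def Spec_bfs (s : String) (t : String) (out : Int) : Prop := out = bfs_alt s t
instance (s : String) (t : String) (out : Int) : Decidable (Spec_bfs s t out) := by unfold Spec_bfs; infer_instance

-- ===== CLAIM (what is proved, stated in full; the proofs are below) =====
def Claim_equal_bfs : Prop := ∀ (s : String) (t : String), Dom_bfs s t → Spec_bfs s t (bfs s t)

-- ===== LEMMAS AND PROOFS =====

-- w reaches s in exactly k backward steps (the common semantics of both programs)
inductive ReachN (s : String) : Nat → String → Prop where
  | refl : ReachN s 0 s
  | stepA (w : String) (k : Nat) : 2 ≤ PySem.Str.len w →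
      PySem.Str.pyGet? w (-1) = some 'A' →
      ReachN s k (pyDropLast w) → ReachN s (k+1) w
  | stepB (w : String) (k : Nat) : 2 ≤ PySem.Str.len w →
      PySem.Str.pyGet? w 0 = some 'B' →
      ReachN s k (pyRevDropLast w) → ReachN s (k+1) w

def Reaches (s w : String) : Prop := ∃ k, ReachN s k w

theorem len_pyDropLast (w : String) (h : 1 ≤ PySem.Str.len w) :
    PySem.Str.len (pyDropLast w) = PySem.Str.len w - 1 := by
  have h1 := PySem.Str.len_eq w
  have h2 := PySem.Str.len_eq (pyDropLast w)
  rw [toList_pyDropLast, List.length_dropLast] at h2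
  omega

theorem len_pyRevDropLast (w : String) (h : 1 ≤ PySem.Str.len w) :
    PySem.Str.len (pyRevDropLast w) = PySem.Str.len w - 1 := by
  have h1 := PySem.Str.len_eq w
  have h2 := PySem.Str.len_eq (pyRevDropLast w)
  rw [toList_pyRevDropLast, List.length_dropLast, List.length_reverse] at h2
  omega

theorem reach_len (s w : String) (k : Nat) (h : ReachN s k w) :
    PySem.Str.len w = PySem.Str.len s + k := by
  induction h with
  | refl => omega
  | stepA w k hl hc _ ih =>
      have := len_pyDropLast w (by omega)
      omega
  | stepB w k hl hc _ ih =>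
      have := len_pyRevDropLast w (by omega)
      omega

theorem reach_inv (s w : String) (k : Nat) (h : ReachN s k w) (hne : w ≠ s) :
    ∃ j, k = j + 1 ∧ 2 ≤ PySem.Str.len w ∧
      ((PySem.Str.pyGet? w (-1) = some 'A' ∧ ReachN s j (pyDropLast w)) ∨
       (PySem.Str.pyGet? w 0 = some 'B' ∧ ReachN s j (pyRevDropLast w))) := by
  cases h with
  | refl => exact absurd rfl hne
  | stepA w k hl hc hr => exact ⟨k, rfl, hl, Or.inl ⟨hc, hr⟩⟩
  | stepB w k hl hc hr => exact ⟨k, rfl, hl, Or.inr ⟨hc, hr⟩⟩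

theorem reaches_of_child_A (s w : String) (hl : 2 ≤ PySem.Str.len w)
    (hc : PySem.Str.pyGet? w (-1) = some 'A') (h : Reaches s (pyDropLast w)) :
    Reaches s w := by
  obtain ⟨k, hk⟩ := h
  exact ⟨k + 1, ReachN.stepA w k hl hc hk⟩

theorem reaches_of_child_B (s w : String) (hl : 2 ≤ PySem.Str.len w)
    (hc : PySem.Str.pyGet? w 0 = some 'B') (h : Reaches s (pyRevDropLast w)) :
    Reaches s w := by
  obtain ⟨k, hk⟩ := h
  exact ⟨k + 1, ReachN.stepB w k hl hc hk⟩

-- ---------- the DFS side ----------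
theorem dfsAlt_correct (s : String) : ∀ w,
    (dfsAlt s w = 1 ↔ Reaches s w) ∧ (dfsAlt s w = 0 ∨ dfsAlt s w = 1) := by
  intro w
  induction hn : w.toList.length using Nat.strong_induction_on generalizing w with
  | _ n ih =>
  subst hn
  rw [dfsAlt]
  by_cases hs : w = s
  · subst hs
    rw [if_pos rfl]
    exact ⟨⟨fun _ => ⟨0, ReachN.refl⟩, fun _ => rfl⟩, Or.inr rfl⟩
  · rw [if_neg hs]
    by_cases hsm : PySem.Str.len w < 2 ∨ PySem.Str.len w < PySem.Str.len s
    · rw [dif_pos hsm]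
      constructor
      · constructor
        · intro h; exact absurd h (by norm_num)
        · rintro ⟨k, hk⟩
          have hlen := reach_len s w k hk
          obtain ⟨j, hj, hl2, _⟩ := reach_inv s w k hk hs
          omega
      · exact Or.inl rfl
    · rw [dif_neg hsm]
      dsimp only
      have hl2 : 2 ≤ PySem.Str.len w := by omega
      have hlw : 2 ≤ w.toList.length := by have := PySem.Str.len_eq w; omega
      have hAlen : (pyDropLast w).toList.length < w.toList.length := by
        rw [toList_pyDropLast, List.length_dropLast]; omega
      have hBlen : (pyRevDropLast w).toList.length < w.toList.length := by
        rw [toList_pyRevDropLast, List.length_dropLast, List.length_reverse]; omega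
      have ihA := ih _ hAlen (pyDropLast w) rfl
      have ihB := ih _ hBlen (pyRevDropLast w) rfl
      by_cases hcA : PySem.Str.pyGet? w (-1) = some 'A'
      · by_cases hcB : PySem.Str.pyGet? w 0 = some 'B'
        · rw [if_pos hcA, if_pos hcB]
          constructor
          · constructor
            · intro h
              split_ifs at h with h1 h2
              · exact reaches_of_child_A s w hl2 hcA (ihA.1.mp h1)
              · exact reaches_of_child_B s w hl2 hcB (ihB.1.mp h2)
              · exact absurd h (by norm_num)
            · rintro ⟨k, hk⟩
              obtain ⟨j, _, _, hch⟩ := reach_inv s w k hk hs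
              rcases hch with ⟨_, hrA⟩ | ⟨_, hrB⟩
              · rw [if_pos (ihA.1.mpr ⟨j, hrA⟩)]
              · by_cases h1 : dfsAlt s (pyDropLast w) = 1
                · rw [if_pos h1]
                · rw [if_neg h1, if_pos (ihB.1.mpr ⟨j, hrB⟩)]
          · split_ifs <;> norm_num
        · rw [if_pos hcA, if_neg hcB]
          constructor
          · constructor
            · intro h
              split_ifs at h with h1 h2
              · exact reaches_of_child_A s w hl2 hcA (ihA.1.mp h1)
              · exact absurd h2 (by norm_num)
              · exact absurd h (by norm_num)
            · rintro ⟨k, hk⟩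
              obtain ⟨j, _, _, hch⟩ := reach_inv s w k hk hs
              rcases hch with ⟨_, hrA⟩ | ⟨hB, _⟩
              · rw [if_pos (ihA.1.mpr ⟨j, hrA⟩)]
              · exact absurd hB hcB
          · split_ifs <;> norm_num
      · by_cases hcB : PySem.Str.pyGet? w 0 = some 'B'
        · rw [if_neg hcA, if_pos hcB]
          constructor
          · constructor
            · intro h
              split_ifs at h with h1 h2
              · exact absurd h1 (by norm_num)
              · exact reaches_of_child_B s w hl2 hcB (ihB.1.mp h2)
              · exact absurd h (by norm_num)
            · rintro ⟨k, hk⟩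
              obtain ⟨j, _, _, hch⟩ := reach_inv s w k hk hs
              rcases hch with ⟨hA, _⟩ | ⟨_, hrB⟩
              · exact absurd hA hcA
              · rw [if_neg (by norm_num), if_pos (ihB.1.mpr ⟨j, hrB⟩)]
          · split_ifs <;> norm_num
        · rw [if_neg hcA, if_neg hcB]
          constructor
          · constructor
            · intro h
              split_ifs at h with h1
              · exact absurd h1 (by norm_num)
              · exact absurd h (by norm_num)
            · rintro ⟨k, hk⟩
              obtain ⟨j, _, _, hch⟩ := reach_inv s w k hk hs
              rcases hch with ⟨hA, _⟩ | ⟨hB, _⟩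
              · exact absurd hA hcA
              · exact absurd hB hcB
          · split_ifs <;> norm_num

-- ---------- the BFS side ----------
set_option maxHeartbeats 1000000 in
theorem mem_bfsStep_snd (word x : String) (v : PySem.Set String) :
    x ∈ (bfsStep word v).2 ↔ x ∈ v ∨ x ∈ (bfsStep word v).1 := by
  unfold bfsStep
  split_ifs <;> (try simp_all [PySem.Set.contains_iff]) <;>
    (try split_ifs) <;> (try simp_all [List.mem_append]) <;> (try tauto)

set_option maxHeartbeats 1000000 in
theorem mem_bfsStep_fst (word x : String) (v : PySem.Set String)
    (h : x ∈ (bfsStep word v).1) :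
    (PySem.Str.pyGet? word (-1) = some 'A' ∧ x = pyDropLast word) ∨
    (PySem.Str.pyGet? word 0 = some 'B' ∧ x = pyRevDropLast word) := by
  unfold bfsStep at h
  split_ifs at h <;> (try simp_all [PySem.Set.contains_iff]) <;>
    (try split_ifs at h) <;> (try simp_all [List.mem_append]) <;> (try tauto)

set_option maxHeartbeats 1000000 in
theorem bfsStep_condA (word : String) (v : PySem.Set String)
    (h : PySem.Str.pyGet? word (-1) = some 'A') :
    pyDropLast word ∈ (bfsStep word v).2 := by
  unfold bfsStep
  split_ifs <;> (try simp_all [PySem.Set.contains_iff]) <;>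
    (try split_ifs) <;> (try simp_all [List.mem_append]) <;> (try tauto)

set_option maxHeartbeats 1000000 in
theorem bfsStep_condB (word : String) (v : PySem.Set String)
    (h : PySem.Str.pyGet? word 0 = some 'B') :
    pyRevDropLast word ∈ (bfsStep word v).2 := by
  unfold bfsStep
  split_ifs <;> (try simp_all [PySem.Set.contains_iff]) <;>
    (try split_ifs) <;> (try simp_all [List.mem_append]) <;> (try tauto)

def LoopInv (s : String) (q : List String) (v : PySem.Set String) : Prop :=
  ∀ x ∈ v, ∀ k, ReachN s k x → ∃ w ∈ q, ∃ j ≤ k, ReachN s j w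

theorem inv_preserved (s word : String) (rest : List String) (v : PySem.Set String)
    (hne : word ≠ s) (hinv : LoopInv s (word :: rest) v) :
    LoopInv s (rest ++ (bfsStep word v).1) (bfsStep word v).2 := by
  intro x hx k
  induction k using Nat.strong_induction_on generalizing x with
  | _ k ih =>
  intro hr
  rw [mem_bfsStep_snd] at hx
  rcases hx with hxv | hxnew
  · obtain ⟨w, hwq, j, hjk, hwr⟩ := hinv x hxv k hr
    rcases List.mem_cons.mp hwq with hw | hw
    · subst hw
      obtain ⟨j', hj', _, hch⟩ := reach_inv s w j hwr hne
      rcases hch with ⟨hA, hrA⟩ | ⟨hB, hrB⟩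
      · have hmem := bfsStep_condA w v hA
        rw [mem_bfsStep_snd] at hmem
        rcases hmem with hv | hn
        · obtain ⟨w', hw', j'', hj'', hr''⟩ :=
            ih j' (by omega) _ ((mem_bfsStep_snd w _ v).mpr (Or.inl hv)) hrA
          exact ⟨w', hw', j'', by omega, hr''⟩
        · exact ⟨pyDropLast w, List.mem_append_right _ hn, j', by omega, hrA⟩
      · have hmem := bfsStep_condB w v hB
        rw [mem_bfsStep_snd] at hmem
        rcases hmem with hv | hn
        · obtain ⟨w', hw', j'', hj'', hr''⟩ :=
            ih j' (by omega) _ ((mem_bfsStep_snd w _ v).mpr (Or.inl hv)) hrB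
          exact ⟨w', hw', j'', by omega, hr''⟩
        · exact ⟨pyRevDropLast w, List.mem_append_right _ hn, j', by omega, hrB⟩
    · exact ⟨w, List.mem_append_left _ hw, j, hjk, hwr⟩
  · exact ⟨x, List.mem_append_right _ hxnew, k, le_refl _, hr⟩

theorem inv_dropped (s word : String) (rest : List String) (v : PySem.Set String)
    (hne : word ≠ s) (hsm : ¬ 2 ≤ PySem.Str.len word)
    (hinv : LoopInv s (word :: rest) v) : LoopInv s rest v := by
  intro x hx k hr
  obtain ⟨w, hwq, j, hjk, hwr⟩ := hinv x hx k hr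
  rcases List.mem_cons.mp hwq with hw | hw
  · subst hw
    obtain ⟨j', _, hl2, _⟩ := reach_inv s w j hwr hne
    exact absurd hl2 hsm
  · exact ⟨w, hw, j, hjk, hwr⟩

theorem bfsLoop_correct (s : String) : ∀ (q : List String) (v : PySem.Set String),
    LoopInv s q v →
    (bfsLoop s q v = 1 ↔ ∃ w ∈ q, Reaches s w) ∧
    (bfsLoop s q v = 0 ∨ bfsLoop s q v = 1) := by
  intro q v
  induction hn : (q.map (fun w => 3 ^ w.toList.length)).sum
      using Nat.strong_induction_on generalizing q v with
  | _ n ih =>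
  subst hn
  intro hinv
  match q with
  | [] =>
      rw [bfsLoop]
      exact ⟨by simp, Or.inl rfl⟩
  | word :: rest =>
      rw [bfsLoop]
      by_cases hs : word = s
      · subst hs
        rw [if_pos rfl]
        exact ⟨⟨fun _ => ⟨word, List.mem_cons_self, 0, ReachN.refl⟩, fun _ => rfl⟩,
          Or.inr rfl⟩
      · rw [if_neg hs]
        by_cases h2 : 2 ≤ PySem.Str.len word
        · rw [dif_pos h2]
          have hdec : ((rest ++ (bfsStep word v).1).map
              (fun w => 3 ^ w.toList.length)).sum <
              ((word :: rest).map (fun w => 3 ^ w.toList.length)).sum := by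
            have hm := bfsStep_measure word v
            have hl : 1 ≤ word.toList.length := by
              have := PySem.Str.len_eq word; omega
            have hp : 3 ^ word.toList.length = 3 ^ (word.toList.length - 1) * 3 := by
              rw [← pow_succ]; congr 1; omega
            have hpos : 1 ≤ 3 ^ (word.toList.length - 1) := Nat.one_le_pow _ _ (by omega)
            simp only [List.map_cons, List.sum_cons, List.map_append, List.sum_append]
            omega
          have hinv' := inv_preserved s word rest v hs hinv
          have hres := ih _ hdec _ _ rfl hinv'
          refine ⟨?_, hres.2⟩
          rw [hres.1]
          constructor
          · rintro ⟨w, hw, hr⟩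
            rcases List.mem_append.mp hw with hw | hw
            · exact ⟨w, List.mem_cons_of_mem _ hw, hr⟩
            · obtain ⟨k, hk⟩ := hr
              rcases mem_bfsStep_fst word w v hw with ⟨hA, rfl⟩ | ⟨hB, rfl⟩
              · exact ⟨word, List.mem_cons_self, k + 1, ReachN.stepA word k h2 hA hk⟩
              · exact ⟨word, List.mem_cons_self, k + 1, ReachN.stepB word k h2 hB hk⟩
          · rintro ⟨w, hw, hr⟩
            rcases List.mem_cons.mp hw with hw | hw
            · subst hw
              obtain ⟨k, hk⟩ := hr
              obtain ⟨j, _, _, hch⟩ := reach_inv s w k hk hs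
              rcases hch with ⟨hA, hrA⟩ | ⟨hB, hrB⟩
              · have hmem := bfsStep_condA w v hA
                rw [mem_bfsStep_snd] at hmem
                rcases hmem with hv | hn
                · obtain ⟨w', hw', j', _, hr'⟩ :=
                    hinv' _ ((mem_bfsStep_snd w _ v).mpr (Or.inl hv)) j hrA
                  exact ⟨w', hw', j', hr'⟩
                · exact ⟨pyDropLast w, List.mem_append_right _ hn, j, hrA⟩
              · have hmem := bfsStep_condB w v hB
                rw [mem_bfsStep_snd] at hmem
                rcases hmem with hv | hn
                · obtain ⟨w', hw', j', _, hr'⟩ :=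
                    hinv' _ ((mem_bfsStep_snd w _ v).mpr (Or.inl hv)) j hrB
                  exact ⟨w', hw', j', hr'⟩
                · exact ⟨pyRevDropLast w, List.mem_append_right _ hn, j, hrB⟩
            · exact ⟨w, List.mem_append_left _ hw, hr⟩
        · rw [dif_neg h2]
          have hdec : (rest.map (fun w => 3 ^ w.toList.length)).sum <
              ((word :: rest).map (fun w => 3 ^ w.toList.length)).sum := by
            simp only [List.map_cons, List.sum_cons]
            have : 0 < 3 ^ word.toList.length := pow_pos (by omega) _
            omega
          have hinv' := inv_dropped s word rest v hs h2 hinv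
          have hres := ih _ hdec _ _ rfl hinv'
          refine ⟨?_, hres.2⟩
          rw [hres.1]
          constructor
          · rintro ⟨w, hw, hr⟩
            exact ⟨w, List.mem_cons_of_mem _ hw, hr⟩
          · rintro ⟨w, hw, hr⟩
            rcases List.mem_cons.mp hw with hw | hw
            · subst hw
              obtain ⟨k, hk⟩ := hr
              obtain ⟨j, _, hl2, _⟩ := reach_inv s w k hk hs
              exact absurd hl2 h2
            · exact ⟨w, hw, hr⟩

-- ===== VERDICT (by name: the statement is the Claim_ definition above) =====
theorem bfs_spec : Claim_equal_bfs := by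
  unfold Claim_equal_bfs
  intro s t _
  unfold Spec_bfs bfs bfs_alt
  have hinv : LoopInv s [t] PySem.Set.empty := by
    intro x hx; cases hx
  have hloop := bfsLoop_correct s [t] PySem.Set.empty hinv
  have hdfs := dfsAlt_correct s t
  by_cases hr : Reaches s t
  · rw [hloop.1.mpr ⟨t, List.mem_singleton_self t, hr⟩, hdfs.1.mpr hr]
  · have h1 : bfsLoop s [t] PySem.Set.empty ≠ 1 := by
      intro h
      obtain ⟨w, hw, hrw⟩ := hloop.1.mp h
      rw [List.mem_singleton] at hw
      subst hw
      exact hr hrw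
    have h2 : dfsAlt s t ≠ 1 := fun h => hr (hdfs.1.mp h)
    rcases hloop.2 with h | h
    · rcases hdfs.2 with h' | h'
      · rw [h, h']
      · exact absurd h' h2
    · exact absurd h h1
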